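/- GENERATED by tools/from_farm_form.py from farm/worked/__asan_load16_noabort/Proof.lean (a worked proof of the farm's unit `__asan_load16_noabort`,
   accepted by the verdict) — do not edit. -/
import Asan.CheckWalk
import ProgX.Base.Spec.Units.asan_load16_noabort

open X86 X86.User Asan ProgX.Base

set_option maxRecDepth 4000
set_option maxHeartbeats 4000000

namespace ProgX.Base.Spec.Proved.asan_load16_noabort
open ProgX.Base.Spec.asan_load16_noabort (Statement)

/-- What the walk of `__asan_load16_noabort` knows of the state `x` at the entry of `range_bad` (after `push rbx`, two `mov`s and the
`call`), relative to the function's own entry state `u`: the registers outside rsi rbx rsp, the vector registers and MXCSR are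
those of `u`, and the 16 bytes at the argument are accessible (the precondition, carried over the two stack stores).
The walker forgets the caller-saved registers of the state BEFORE a call; `range_bad` keeps more than the ABI says (`Keeps clobN`),
and `check16Spec.post` needs that: the facts are carried through the call as a ghost of the callee's contract (`rangeBadGhost_w`). -/
def EntryFacts_w (u x : State) : Prop :=
  RegsKept [.rsi, .rbx, .rsp] u x ∧ x.zmm = u.zmm ∧ x.mxcsr = u.mxcsr ∧
    Accessible x.mem (x.reg .rdi).toNat (x.reg .rsi).toNat

/-- `Asan.rangeBadSpec` with the ghost `u` (the entry state of the caller): the precondition also asks for `EntryFacts_w u x`, the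
postcondition gives it back. Same frame (0) and windows (none), so the footprint is the same. -/
def rangeBadGhost_w (u : State) : Spec where
  pre x := rangeBadSpec.pre x ∧ EntryFacts_w u x
  post x v := rangeBadSpec.post x v ∧ EntryFacts_w u x
  frame := 0
  writes _ := []

/-- The ghosted contract of `range_bad` follows from its contract: a fact about the entry state alone passes through the call. -/
theorem rangeBadGhost_calls_w {Lay : Layout} {μ : Microarch} {I : State → Prop} {K : Conv} {entry : Word}
    (h : Calls Lay μ I K entry rangeBadSpec) (u : State) : Calls Lay μ I K entry (rangeBadGhost_w u) := by
  intro x ret he hp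
  have he' : AtEntry K entry rangeBadSpec.frame ret x := he
  refine (h x ret he' hp.1).mono ?_
  intro v hv
  exact ⟨hv.rip, hv.rsp, hv.saved, hv.same, hv.code, hv.inv, hv.post, hp.2⟩

end ProgX.Base.Spec.Proved.asan_load16_noabort

/-- `__asan_load16_noabort(a)` satisfies `Asan.check16Spec`: `push rbx`, `call range_bad(a, 16)`, which returns 0 because the 16
bytes are accessible (the two stack stores did not touch the shadow), so the path into `__asan_report` is infeasible; `pop rbx`,
`ret`. Everything but rax rdx rsi rdi rsp is kept: `range_bad` keeps rcx, r8–r11 (`Keeps clobN`). -/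
theorem ProgX.Base.Spec.Proved.asan_load16_noabort_ok : ProgX.Base.Spec.asan_load16_noabort.Statement := by
  intro Lay hLay μ hμ u₀ hcode h_range_bad u ret he hpre
  v_entry he
  -- (a fact about the vector registers, so that the walk tracks them: `w_zmm`)
  have hzmm : u.zmm = u.zmm := rfl
  -- the contract of `range_bad`, with what this walk knows at its entry as a ghost
  have hg := ProgX.Base.Spec.Proved.asan_load16_noabort.rangeBadGhost_calls_w h_range_bad u
  clear h_range_bad
  -- 0x1009c0 … 0x1009c9, asan_rt.c:93-94: push, the two arguments, the call of `range_bad`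
  u_walk hcode [hμ.vendor] until [ProgX.Base.L.__asan_load16_noabort.cut1] span [ProgX.Base.L.textLo, ProgX.Base.L.textHi] side (v_side)
  · -- call_room: `range_bad` is a leaf without a frame
    show (conv u₀).stackLo + 0 ≤ _
    simp only [ProgX.Base.conv_stackLo]
    u_omega
  · -- call_inv: DF and MXCSR are those of the entry
    v_inv
  · -- the precondition of `range_bad`: the size is 16; and the ghost: the two pushes did not touch the shadow
    have hun : ShadowUntouched u.mem s_1009c9.mem := by v_untouched
    have hrdi : s_1009c9.reg .rdi = u.reg .rdi := w_kept.get .rdi (by rfl)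
    refine ⟨?_, w_kept, w_zmm, w_mxcsr, ?_⟩
    · show 1 ≤ (s_1009c9.reg .rsi).toNat
      rw [w_rsi]
      decide
    · rw [hrdi, w_rsi]
      exact hpre.eqOn (by decide) hun
  -- 0x1009ce (cut1), asan_rt.c:94: after the return of `range_bad`; its post gives rax = 0, the same memory, the registers
  obtain ⟨⟨hmemeq, ⟨hk2, hz2, hm2⟩, hle, hiff⟩, hk1, hz1, hm1, hacc⟩ := w_post
  have w_rax : s_1009c9r.reg .rax = 0 := by
    apply UInt64.toNat_inj.mp
    exact hiff.mpr hacc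
  have w_mem : s_1009c9r.mem = _ := hmemeq.trans w_mem_1009c9
  have w_zmm : s_1009c9r.zmm = u.zmm := hz2.trans hz1
  have w_mxcsr : s_1009c9r.mxcsr = u.mxcsr := hm2.trans hm1
  have w_eq := ProgX.Base.conv_code_eqOn w_code
  have hdf : s_1009c9r.flags .df = false := (show X86.User.abiInv _ from w_inv).1
  -- the registers: `range_bad` changed rax rdx rdi rsp only, not all the caller-saved ones
  replace w_kept : RegsKept [.rsi, .rbx, .rsp, .rax, .rdx, .rdi] u s_1009c9r :=
    (hk1.mono_all (by rfl)).trans (hk2.mono_all (by rfl))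
  clear hk1 hk2 hz1 hz2 hm1 hm2 hiff hle hmemeq w_mem_1009c9 w_same
  u_walk hcode [hμ.vendor] span [ProgX.Base.L.textLo, ProgX.Base.L.textHi] side (v_side)
  · -- 0x1009d4 … 0x1009e1, asan_rt.c:95: the path into `__asan_report` is infeasible: `range_bad` returned 0
    exfalso
    exact hbr_1009d0 (by decide)
  · -- 0x1009d3, asan_rt.c:97: the state after the `ret`: the contract's `Returned`
    refine ReachVia.done ?_
    v_returned
    -- the post: rbx was popped back, the other registers outside `clob16` were never written
    refine ⟨?_, w_zmm, w_mxcsr⟩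
    unfold clob16
    u_saved
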